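-- pv_equiv track=rewrite | github.com/SalahHW/epreuve_du_feu | 2_majuscule/majuscule.py | majuscule_minuscule
-- ===== SOURCE A (Python) =====
-- def majuscule_minuscule(string):
--   new_string = ''
--   i = 0
--   for letter_index in range(len(string)):
--     if string[letter_index] == ' ':
--       new_string += ' '
--       continue
--
--     if i % 2 == 0:
--       new_string += string[letter_index].lower()
--       i += 1
--     else:
--       new_string += string[letter_index].upper()
--       i += 1
--   return new_string
-- ===== SOURCE B (Python) =====
-- def majuscule_minuscule(string):
--     letters = [c for c in string if c != ' ']
--     cased = [c.lower() if k % 2 == 0 else c.upper() for k, c in enumerate(letters)]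
--     it = iter(cased)
--     parts = []
--     for c in string:
--         parts.append(' ' if c == ' ' else next(it))
--     return ''.join(parts)
-- ===== Notes on version B (the rewrite author's own statement) =====
-- stated objective: alternative
-- what changed: A does one counting pass with a running non-space parity counter; B first extracts the non-space characters and cases each by its enumerate-index parity, then merges the pre-cased stream back over the spaces in a second pass.
import Mathlib
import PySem

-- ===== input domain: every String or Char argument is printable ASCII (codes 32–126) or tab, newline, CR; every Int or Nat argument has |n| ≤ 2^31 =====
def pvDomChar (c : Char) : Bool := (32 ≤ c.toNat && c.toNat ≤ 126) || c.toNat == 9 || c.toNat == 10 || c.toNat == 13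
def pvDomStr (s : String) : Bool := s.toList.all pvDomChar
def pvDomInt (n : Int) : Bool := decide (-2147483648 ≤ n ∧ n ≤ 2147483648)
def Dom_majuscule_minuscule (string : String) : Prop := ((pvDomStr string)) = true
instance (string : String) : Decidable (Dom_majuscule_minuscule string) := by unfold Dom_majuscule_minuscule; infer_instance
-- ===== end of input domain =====

-- B alternates case with an extract-transform-merge decomposition instead of A's single counting pass; same cost, alternative structure.

-- ===== PORT A =====
-- loop body of A: state is (new_string, i), c is string[letter_index]
def pvStepA (st : List Char × Int) (c : Char) : List Char × Int :=
  if c = ' ' then (st.1 ++ [' '], st.2)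
  else if PySem.Int.mod st.2 2 = 0 then (st.1 ++ [PySem.Chars.lowerChar c], st.2 + 1)
  else (st.1 ++ [PySem.Chars.upperChar c], st.2 + 1)

def majuscule_minuscule (string : String) : String :=
  String.ofList
    (((PySem.List.pyRange 0 (PySem.List.len string.toList) 1).foldl
      (fun st li => pvStepA st (PySem.List.pyGetD string.toList li ' ')) ([], 0)).1)

-- ===== PORT B =====
-- casing of one enumerated non-space character
def pvCase (p : Int × Char) : Char :=
  if PySem.Int.mod p.1 2 = 0 then PySem.Chars.lowerChar p.2 else PySem.Chars.upperChar p.2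

-- merge phase: a space stays a space, otherwise pull the next pre-cased letter from the stream
def pvMerge : List Char → List Char → List Char
  | [], _ => []
  | c :: rest, stream =>
      if c = ' ' then ' ' :: pvMerge rest stream
      else match stream with
        | s :: ss => s :: pvMerge rest ss
        | [] => []          -- unreachable: the stream has one letter per non-space character

def majuscule_minuscule_alt (string : String) : String :=
  String.ofList
    (pvMerge string.toList
      ((PySem.List.enumerate (string.toList.filter (fun c => c ≠ ' ')) 0).map pvCase))

-- ===== PRECONDITION & SPEC =====
def Spec_majuscule_minuscule (string : String) (out : String) : Prop := out = majuscule_minuscule_alt string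
instance (string : String) (out : String) : Decidable (Spec_majuscule_minuscule string out) := by unfold Spec_majuscule_minuscule; infer_instance

-- ===== CLAIM (what is proved, stated in full; the proofs are below) =====
def Claim_equal_majuscule_minuscule : Prop := ∀ (string : String), Dom_majuscule_minuscule string → Spec_majuscule_minuscule string (majuscule_minuscule string)

-- ===== LEMMAS AND PROOFS =====

-- reference recursion both programs compute: alternate case over non-spaces, parity carried in i
def pvSpecRec : List Char → Int → List Char
  | [], _ => []
  | c :: r, i =>
      if c = ' ' then ' ' :: pvSpecRec r i
      else (if PySem.Int.mod i 2 = 0 then PySem.Chars.lowerChar c else PySem.Chars.upperChar c)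
            :: pvSpecRec r (i + 1)

theorem foldA_eq (cs : List Char) : ∀ (acc : List Char) (i : Int),
    (cs.foldl pvStepA (acc, i)).1 = acc ++ pvSpecRec cs i := by
  induction cs with
  | nil => intro acc i; simp [pvSpecRec]
  | cons c r ih =>
      intro acc i
      by_cases hc : c = ' '
      · simp [pvStepA, pvSpecRec, hc, ih]
      · by_cases hd : (2:Int) ∣ i <;>
          simp [pvStepA, pvSpecRec, hc, hd, ih]

theorem mergeB_eq (cs : List Char) : ∀ (i : Int),
    pvMerge cs ((PySem.List.enumerate (cs.filter (fun c => c ≠ ' ')) i).map pvCase)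
      = pvSpecRec cs i := by
  induction cs with
  | nil => intro i; simp [pvMerge, pvSpecRec]
  | cons c r ih =>
      intro i
      simp only [ne_eq, decide_not] at ih
      by_cases hc : c = ' '
      · simp [pvMerge, pvSpecRec, hc, ih]
      · simp [pvMerge, pvSpecRec, hc, PySem.List.enumerate_cons, pvCase, ih]

-- ===== VERDICT (by name: the statement is the Claim_ definition above) =====
theorem majuscule_minuscule_spec : Claim_equal_majuscule_minuscule := by
  unfold Claim_equal_majuscule_minuscule
  intro s _
  show majuscule_minuscule s = majuscule_minuscule_alt s
  unfold majuscule_minuscule majuscule_minuscule_alt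
  rw [PySem.List.foldl_pyRange_zero_pyGetD s.toList ' ' pvStepA ([], 0)]
  rw [foldA_eq, mergeB_eq]
  simp
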